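-- pv_equiv track=rewrite | github.com/emum/family_grocery_cli | recipes.py | canonical_unit
-- ===== SOURCE A (Python) =====
-- UNIT_ALIASES = {
--     "tsp": ["tsp", "teaspoon", "teaspoons"],
--     "tbsp": ["tbsp", "tablespoon", "tablespoons"],
--     "cup": ["cup", "cups"],
--     "oz": ["oz", "ounce", "ounces"],
--     "lb": ["lb", "lbs", "pound", "pounds"],
--     "g": ["g", "gram", "grams"],
--     "kg": ["kg", "kilogram", "kilograms"],
--     "ml": ["ml", "milliliter", "milliliters"],
--     "l": ["l", "liter", "liters"],
-- }
--
-- def canonical_unit(token: str | None):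
--     if not token:
--         return None
--     t = token.lower().strip()
--     for canon, variants in UNIT_ALIASES.items():
--         if t in variants:
--             return canon
--     return t  # leave as-is if unknown
-- ===== SOURCE B (Python) =====
-- # Morphological normalizer: strip a plural suffix and map singular stems to their
-- # abbreviation, instead of scanning alias variant lists.
-- CANONICAL = {"tsp", "tbsp", "cup", "oz", "lb", "g", "kg", "ml", "l"}
--
-- STEM = {
--     "teaspoon": "tsp",
--     "tablespoon": "tbsp",
--     "cup": "cup",
--     "ounce": "oz",
--     "lb": "lb",
--     "pound": "lb",
--     "gram": "g",
--     "kilogram": "kg",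
--     "milliliter": "ml",
--     "liter": "l",
-- }
--
-- def canonical_unit(token):
--     if not token:
--         return None
--     t = token.lower().strip()
--     if t in CANONICAL:
--         return t
--     if t.endswith("s") and t[:-1] in STEM:
--         return STEM[t[:-1]]
--     return STEM.get(t, t)
-- ===== Notes on version B (the rewrite author's own statement) =====
-- stated objective: alternative
-- what changed: Replaces the scan over alias variant lists with a morphological normalizer: accept canonical abbreviations directly, strip a plural suffix and map the singular stem through a stem->abbreviation table; the alias lists disappear.
import Mathlib
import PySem

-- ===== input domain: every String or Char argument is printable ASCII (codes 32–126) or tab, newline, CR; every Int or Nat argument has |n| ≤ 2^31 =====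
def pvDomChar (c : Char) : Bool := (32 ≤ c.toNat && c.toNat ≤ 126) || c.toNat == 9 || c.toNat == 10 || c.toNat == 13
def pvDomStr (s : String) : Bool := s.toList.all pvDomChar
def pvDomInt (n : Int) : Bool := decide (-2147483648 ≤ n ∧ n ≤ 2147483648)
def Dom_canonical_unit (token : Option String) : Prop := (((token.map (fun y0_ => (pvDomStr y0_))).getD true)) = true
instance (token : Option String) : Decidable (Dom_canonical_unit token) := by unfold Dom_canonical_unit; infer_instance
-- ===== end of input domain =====

-- B normalizes morphologically (accept an abbreviation, or strip a plural suffix and map the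
-- singular stem through a stem->abbreviation table) instead of A's scan over alias lists.

-- ===== PORT A =====
def unitAliases : List (String × List String) :=
  [("tsp", ["tsp", "teaspoon", "teaspoons"]),
   ("tbsp", ["tbsp", "tablespoon", "tablespoons"]),
   ("cup", ["cup", "cups"]),
   ("oz", ["oz", "ounce", "ounces"]),
   ("lb", ["lb", "lbs", "pound", "pounds"]),
   ("g", ["g", "gram", "grams"]),
   ("kg", ["kg", "kilogram", "kilograms"]),
   ("ml", ["ml", "milliliter", "milliliters"]),
   ("l", ["l", "liter", "liters"])]

-- the 'for canon, variants in UNIT_ALIASES.items(): if t in variants: return canon' loop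
def findCanon (t : String) : List (String × List String) → Option String
  | [] => none
  | (canon, variants) :: rest =>
      if t ∈ variants then some canon else findCanon t rest

def canonical_unit (token : Option String) : Option String :=
  match token with
  | none => none
  | some s =>
    if s = "" then none
    else
      let t := PySem.Str.strip (PySem.Str.lower s)
      match findCanon t unitAliases with
      | some canon => some canon
      | none => some t

-- ===== PORT B =====
-- CANONICAL = {"tsp","tbsp","cup","oz","lb","g","kg","ml","l"}  (a Python set)
def canonicalSet : PySem.Set String :=
  PySem.Set.ofList ["tsp", "tbsp", "cup", "oz", "lb", "g", "kg", "ml", "l"]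

-- STEM: singular stem -> canonical abbreviation
def stemDict : PySem.Dict String String :=
  PySem.Dict.ofList
    [("teaspoon", "tsp"), ("tablespoon", "tbsp"), ("cup", "cup"), ("ounce", "oz"),
     ("lb", "lb"), ("pound", "lb"), ("gram", "g"), ("kilogram", "kg"),
     ("milliliter", "ml"), ("liter", "l")]

def canonical_unit_alt (token : Option String) : Option String :=
  match token with
  | none => none
  | some s =>
    if s = "" then none
    else
      let t := PySem.Str.strip (PySem.Str.lower s)
      if PySem.Set.contains canonicalSet t then some t
      else if PySem.Str.endswith t "s" then
        -- t[:-1] on a string ending in "s" is exactly dropLast of its characters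
        match stemDict.get? (String.ofList t.toList.dropLast) with
        | some c => some c
        | none => some (stemDict.getD t t)
      else some (stemDict.getD t t)

-- ===== PRECONDITION & SPEC =====
def Spec_canonical_unit (token : Option String) (out : Option String) : Prop := out = canonical_unit_alt token
instance (token : Option String) (out : Option String) : Decidable (Spec_canonical_unit token out) := by unfold Spec_canonical_unit; infer_instance

-- ===== CLAIM (what is proved, stated in full; the proofs are below) =====
def Claim_equal_canonical_unit : Prop := ∀ (token : Option String), Dom_canonical_unit token → Spec_canonical_unit token (canonical_unit token)

-- ===== LEMMAS AND PROOFS =====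

-- all 27 alias variants, for case analysis in the proof
def allVariants : List String :=
  ["tsp", "teaspoon", "teaspoons", "tbsp", "tablespoon", "tablespoons", "cup", "cups",
   "oz", "ounce", "ounces", "lb", "lbs", "pound", "pounds", "g", "gram", "grams",
   "kg", "kilogram", "kilograms", "ml", "milliliter", "milliliters", "l", "liter", "liters"]

-- on every string, A's alias-list scan and B's morphological normalizer agree
lemma core (t : String) :
    (match findCanon t unitAliases with
     | some canon => some canon
     | none => some t) =
    (if PySem.Set.contains canonicalSet t then some t
     else if PySem.Str.endswith t "s" then
       match stemDict.get? (String.ofList t.toList.dropLast) with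
       | some c => some c
       | none => some (stemDict.getD t t)
     else some (stemDict.getD t t)) := by
  by_cases h : t ∈ allVariants
  · simp only [allVariants, List.mem_cons, List.not_mem_nil, or_false] at h
    rcases h with rfl|rfl|rfl|rfl|rfl|rfl|rfl|rfl|rfl|rfl|rfl|rfl|rfl|rfl|rfl|rfl|rfl|rfl|rfl|rfl|rfl|rfl|rfl|rfl|rfl|rfl|rfl <;> decide
  · simp only [allVariants, List.mem_cons, List.not_mem_nil, or_false, not_or] at h
    have hA : findCanon t unitAliases = none := by
      simp [findCanon, unitAliases, h]
    have hset : PySem.Set.contains canonicalSet t = false := by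
      rw [Bool.eq_false_iff]
      intro hc
      have hm := List.mem_of_elem_eq_true hc
      rw [show canonicalSet = ["tsp", "tbsp", "cup", "oz", "lb", "g", "kg", "ml", "l"] from rfl] at hm
      simp only [List.mem_cons, List.not_mem_nil, or_false] at hm
      tauto
    have hsd : stemDict = PySem.Dict.mk
        [("teaspoon", "tsp"), ("tablespoon", "tbsp"), ("cup", "cup"), ("ounce", "oz"),
         ("lb", "lb"), ("pound", "lb"), ("gram", "g"), ("kilogram", "kg"),
         ("milliliter", "ml"), ("liter", "l")] := by rfl
    have hgetD : stemDict.getD t t = t := by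
      have hstem : stemDict.get? t = none := by
        rw [PySem.Dict.get?_eq_none_iff_not_mem_keys, hsd, PySem.Dict.keys_mk]
        intro hk
        simp at hk
        tauto
      rw [PySem.Dict.getD_eq_get?_getD, hstem]; rfl
    rw [hA, hset]
    simp only [Bool.false_eq_true, if_false]
    by_cases he : PySem.Str.endswith t "s" = true
    · obtain ⟨l, hl⟩ := (PySem.Chars.endswith_iff t.toList "s".toList).mp
        (by rw [← PySem.Str.endswith_eq]; exact he)
      have hdl : t.toList.dropLast = l := by rw [← hl]; simp
      have hget : stemDict.get? (String.ofList t.toList.dropLast) = none := by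
        rw [PySem.Dict.get?_eq_none_iff_not_mem_keys, hsd, PySem.Dict.keys_mk, hdl]
        intro hk
        simp at hk
        have ht : ∀ k : String, String.ofList l = k → t = String.ofList (k.toList ++ ['s']) := by
          intro k hkk
          have hlt : l = k.toList := by simpa using congrArg String.toList hkk
          rw [← String.ofList_toList (s := t), ← hl, hlt]; rfl
        rcases hk with hk|hk|hk|hk|hk|hk|hk|hk|hk|hk <;> (have := ht _ hk; rw [show String.ofList _ = _ from rfl] at this) <;> tauto
      rw [he, if_pos rfl, hget, hgetD]
    · rw [Bool.not_eq_true] at he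
      rw [he]
      simp only [Bool.false_eq_true, if_false, hgetD]

-- ===== VERDICT (by name: the statement is the Claim_ definition above) =====
theorem canonical_unit_spec : Claim_equal_canonical_unit := by
  intro token _
  unfold Spec_canonical_unit canonical_unit canonical_unit_alt
  cases token with
  | none => rfl
  | some s =>
    by_cases h : s = ""
    · simp [h]
    · simp only [if_neg h]
      set t := PySem.Str.strip (PySem.Str.lower s) with ht
      exact core t
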